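-- pv_equiv track=rewrite | github.com/behnamafrasyabi/python-project | EX3/EX3_3.py | EX3_3
-- ===== SOURCE A (Python) =====
-- def EX3_3(x):
--     n=0
--     s=0
--     w=0
--     e=0
--     for j in x :
--         if (j=='n'):
--             n+=1
--         if (j=='s'):
--             s+=1
--         if (j=='w'):
--             w+=1
--         if (j=='e'):
--             e+=1
--     verticaln=n-s
--     horizontalw=w-e
--     horizontale=e-w
--     verticals=s-n
--     if(verticaln==2 and horizontale==3):
--         return("True")
--
--     elif(horizontalw==4 and verticaln==3):
--         return("True")
--     else:
--         return("False")
-- ===== SOURCE B (Python) =====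
-- def EX3_3(x):
--     # Divide-and-conquer over the walk: displacements form a monoid, so the net
--     # (vertical, horizontal) position is computed by splitting the string in half
--     # and adding the two halves' net displacements.
--     DIR = {'n': (1, 0), 's': (-1, 0), 'e': (0, 1), 'w': (0, -1)}
--
--     def disp(lo, hi):
--         if hi - lo <= 1:
--             return DIR.get(x[lo], (0, 0)) if hi - lo == 1 else (0, 0)
--         mid = (lo + hi) // 2
--         v1, h1 = disp(lo, mid)
--         v2, h2 = disp(mid, hi)
--         return (v1 + v2, h1 + h2)
--
--     return "True" if disp(0, len(x)) in ((2, 3), (3, -4)) else "False"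
-- ===== Notes on version B (the rewrite author's own statement) =====
-- stated objective: alternative
-- what changed: Replaces the single interleaved four-counter loop with a divide-and-conquer reduction: the string is split recursively in half and the net (vertical, horizontal) displacement of each half is summed, then the final position is tested against the two accepting positions.
import Mathlib
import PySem

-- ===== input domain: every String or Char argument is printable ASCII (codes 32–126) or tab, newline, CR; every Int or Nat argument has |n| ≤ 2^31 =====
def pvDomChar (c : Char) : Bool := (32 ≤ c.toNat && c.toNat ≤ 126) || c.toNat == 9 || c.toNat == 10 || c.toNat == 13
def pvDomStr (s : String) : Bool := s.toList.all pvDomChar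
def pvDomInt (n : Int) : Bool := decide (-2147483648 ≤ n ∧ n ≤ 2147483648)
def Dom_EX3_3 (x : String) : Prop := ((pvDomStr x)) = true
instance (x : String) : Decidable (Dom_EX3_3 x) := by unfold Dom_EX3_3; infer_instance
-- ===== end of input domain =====

-- B replaces A's interleaved four-counter loop by a divide-and-conquer reduction summing net (vertical, horizontal) displacements of the two string halves (objective: alternative, same cost).

-- ===== PORT A =====
def EX3_3 (x : String) : String :=
  let st := x.toList.foldl (fun (st : Int × Int × Int × Int) j =>
    let st := if j == 'n' then (st.1 + 1, st.2.1, st.2.2.1, st.2.2.2) else st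
    let st := if j == 's' then (st.1, st.2.1 + 1, st.2.2.1, st.2.2.2) else st
    let st := if j == 'w' then (st.1, st.2.1, st.2.2.1 + 1, st.2.2.2) else st
    let st := if j == 'e' then (st.1, st.2.1, st.2.2.1, st.2.2.2 + 1) else st
    st) (0, 0, 0, 0)
  let n := st.1
  let s := st.2.1
  let w := st.2.2.1
  let e := st.2.2.2
  let verticaln := n - s
  let horizontalw := w - e
  let horizontale := e - w
  let _verticals := s - n
  if verticaln == 2 && horizontale == 3 then "True"
  else if horizontalw == 4 && verticaln == 3 then "True"
  else "False"

-- ===== PORT B =====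
-- Source B's DIR.get(c, (0, 0))
def pvDir (c : Char) : Int × Int :=
  if c = 'n' then (1, 0)
  else if c = 's' then (-1, 0)
  else if c = 'e' then (0, 1)
  else if c = 'w' then (0, -1)
  else (0, 0)

-- Source B's disp(lo, hi): the index pair (lo, hi) into x is represented by the sub-list x.toList[lo:hi] itself
def pvDisp (cs : List Char) : Int × Int :=
  if _h : cs.length ≤ 1 then
    match cs with
    | [] => (0, 0)
    | c :: _ => pvDir c
  else
    let mid := cs.length / 2
    let p := pvDisp (cs.take mid)
    let q := pvDisp (cs.drop mid)
    (p.1 + q.1, p.2 + q.2)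
termination_by cs.length
decreasing_by
  · simp only [List.length_take]; omega
  · simp only [List.length_drop]; omega

def EX3_3_alt (x : String) : String :=
  let p := pvDisp x.toList
  if p == (2, 3) || p == (3, -4) then "True" else "False"

-- ===== PRECONDITION & SPEC =====
def Spec_EX3_3 (x : String) (out : String) : Prop := out = EX3_3_alt x
instance (x : String) (out : String) : Decidable (Spec_EX3_3 x out) := by unfold Spec_EX3_3; infer_instance

-- ===== CLAIM (what is proved, stated in full; the proofs are below) =====
def Claim_equal_EX3_3 : Prop := ∀ (x : String), Dom_EX3_3 x → Spec_EX3_3 x (EX3_3 x)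

-- ===== LEMMAS AND PROOFS =====

-- B's divide-and-conquer computes (count 'n' - count 's', count 'e' - count 'w').
theorem pvDisp_eq (cs : List Char) :
    pvDisp cs = ((cs.count 'n' : Int) - cs.count 's', (cs.count 'e' : Int) - cs.count 'w') := by
  fun_induction pvDisp cs with
  | case1 => simp
  | case2 c t h1 h2 =>
    have ht : t = [] := by
      have : t.length = 0 := by simpa using h2
      simpa using this
    subst ht
    by_cases hn : c = 'n' <;> by_cases hs : c = 's' <;> by_cases he : c = 'e' <;>
      by_cases hw : c = 'w' <;> simp_all [pvDir]
  | case3 cs h mid p q ih2 ih1 =>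
    simp only [p, q, ih1, ih2]
    have hcnt : ∀ c : Char, cs.count c = (cs.take mid).count c + (cs.drop mid).count c := by
      intro c
      rw [← List.count_append, List.take_append_drop]
    simp only [hcnt, Prod.mk.injEq]
    push_cast
    constructor <;> ring

-- A's interleaved fold computes the four character counts.
theorem fold_counts (cs : List Char) : ∀ (a b c d : Int),
    cs.foldl (fun (st : Int × Int × Int × Int) j =>
      let st := if j == 'n' then (st.1 + 1, st.2.1, st.2.2.1, st.2.2.2) else st
      let st := if j == 's' then (st.1, st.2.1 + 1, st.2.2.1, st.2.2.2) else st
      let st := if j == 'w' then (st.1, st.2.1, st.2.2.1 + 1, st.2.2.2) else st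
      let st := if j == 'e' then (st.1, st.2.1, st.2.2.1, st.2.2.2 + 1) else st
      st) (a, b, c, d)
    = (a + cs.count 'n', b + cs.count 's', c + cs.count 'w', d + cs.count 'e') := by
  induction cs with
  | nil => intro a b c d; simp
  | cons h t ih =>
    intro a b c d
    simp only [List.foldl_cons, List.count_cons, ih]
    by_cases hn : h = 'n' <;> by_cases hs : h = 's' <;> by_cases hw : h = 'w' <;>
      by_cases he : h = 'e' <;>
      simp_all <;> omega

-- The two final branch structures agree for all integer counts.
theorem branch_eq (n s w e : Int) :
    (if ((n - s == 2) && (e - w == 3)) = true then "True"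
     else if ((w - e == 4) && (n - s == 3)) = true then "True" else "False")
    = (if ((((n - s, e - w) : Int × Int) == (2, 3)) || (((n - s, e - w) : Int × Int) == (3, -4))) = true
       then "True" else "False") := by
  simp only [beq_iff_eq, Prod.mk.injEq, Bool.or_eq_true, Bool.and_eq_true]
  split_ifs <;> first | rfl | (exfalso; omega)

-- ===== VERDICT (by name: the statement is the Claim_ definition above) =====
theorem EX3_3_spec : Claim_equal_EX3_3 := by
  intro x _
  unfold Spec_EX3_3 EX3_3 EX3_3_alt
  simp only [fold_counts x.toList 0 0 0 0, pvDisp_eq, zero_add]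
  exact branch_eq _ _ _ _
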